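-- pv_equiv track=rewrite | github.com/owenmiester05/advent_of_code_2024 | day_2/solution.py | part_2
-- ===== SOURCE A (Python) =====
-- def is_valid(nums):
--     if all(nums[i] < nums[i+1] and nums[i+1] - nums[i] <= 3 for i in range(len(nums)-1)) or \
--     all(nums[i] > nums[i+1] and nums[i] - nums[i+1] <= 3 for i in range(len(nums)-1)):
--         return 1
--     else:
--         return 0
--
-- def part_2(nums):
--     if is_valid(nums):
--         return 1
--     else:
--         for i in range(len(nums)):
--             if is_valid(nums[:i] + nums[i+1:]):
--                 return 1
--     return 0
-- ===== SOURCE B (Python) =====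
-- def part_2(nums):
--     # O(n): find the first bad adjacent pair; only removing one of its two
--     # endpoints can help. Decreasing case is handled by negating the list.
--     def first_bad(seq):
--         for i, (a, b) in enumerate(zip(seq, seq[1:])):
--             if not (a < b and b - a <= 3):
--                 return i
--         return None
--
--     def dir_ok(seq):
--         i = first_bad(seq)
--         if i is None:
--             return True
--         return first_bad(seq[:i] + seq[i + 1:]) is None or \
--                first_bad(seq[:i + 1] + seq[i + 2:]) is None
--
--     return 1 if dir_ok(nums) or dir_ok([-x for x in nums]) else 0
-- ===== Notes on version B (the rewrite author's own statement) =====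
-- stated objective: faster
-- what changed: A retries the full validity check on every one-element deletion (quadratic); B makes one linear scan per direction, locates the first bad adjacent pair and tests only the removal of its two endpoints, handling the decreasing direction by negating the list.
import Mathlib
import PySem

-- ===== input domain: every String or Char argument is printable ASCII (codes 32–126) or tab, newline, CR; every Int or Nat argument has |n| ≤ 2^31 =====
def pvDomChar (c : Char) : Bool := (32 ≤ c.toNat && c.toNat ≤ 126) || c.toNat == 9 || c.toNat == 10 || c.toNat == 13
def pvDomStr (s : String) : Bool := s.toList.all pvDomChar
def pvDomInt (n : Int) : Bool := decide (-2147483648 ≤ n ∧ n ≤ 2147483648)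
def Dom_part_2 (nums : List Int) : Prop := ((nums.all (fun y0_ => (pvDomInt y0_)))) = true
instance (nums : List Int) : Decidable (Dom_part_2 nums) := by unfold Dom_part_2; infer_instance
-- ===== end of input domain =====

-- B replaces A's quadratic try-every-deletion scan by a single linear pass: only the
-- two endpoints of the FIRST bad adjacent pair can be the removed element (decreasing
-- runs are handled by negating the list). Objective: faster (asymptotic).

-- ===== PORT A =====
def isValidA (nums : List Int) : Int :=
  if ((PySem.List.pyRange 0 ((nums.length : Int) - 1) 1).all (fun i =>
        decide (PySem.List.pyGetD nums i 0 < PySem.List.pyGetD nums (i + 1) 0 ∧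
                PySem.List.pyGetD nums (i + 1) 0 - PySem.List.pyGetD nums i 0 ≤ 3))
      ||
      (PySem.List.pyRange 0 ((nums.length : Int) - 1) 1).all (fun i =>
        decide (PySem.List.pyGetD nums i 0 > PySem.List.pyGetD nums (i + 1) 0 ∧
                PySem.List.pyGetD nums i 0 - PySem.List.pyGetD nums (i + 1) 0 ≤ 3)))
  then 1 else 0

def part2Loop (nums : List Int) : List Int → Int
  | [] => 0
  | i :: rest =>
    if isValidA (PySem.List.slice nums none (some i) ++ PySem.List.slice nums (some (i + 1)) none) ≠ 0
    then 1 else part2Loop nums rest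

def part_2 (nums : List Int) : Int :=
  if isValidA nums ≠ 0 then 1
  else part2Loop nums (PySem.List.pyRange 0 (nums.length : Int) 1)

-- ===== PORT B =====
def okStep (a b : Int) : Bool := decide (a < b) && decide (b - a ≤ 3)

def firstBad : List Int → Option Nat
  | a :: b :: rest => if okStep a b then (firstBad (b :: rest)).map (· + 1) else some 0
  | _ => none

def dirOk (seq : List Int) : Bool :=
  match firstBad seq with
  | none => true
  | some i =>
      (firstBad (seq.take i ++ seq.drop (i + 1))).isNone ||
      (firstBad (seq.take (i + 1) ++ seq.drop (i + 2))).isNone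

def part_2_alt (nums : List Int) : Int :=
  if dirOk nums || dirOk (nums.map (fun x => -x)) then 1 else 0

-- ===== PRECONDITION & SPEC =====
def Spec_part_2 (nums : List Int) (out : Int) : Prop := out = part_2_alt nums
instance (nums : List Int) (out : Int) : Decidable (Spec_part_2 nums out) := by unfold Spec_part_2; infer_instance

-- ===== CLAIM (what is proved, stated in full; the proofs are below) =====
def Claim_equal_part_2 : Prop := ∀ (nums : List Int), Dom_part_2 nums → Spec_part_2 nums (part_2 nums)

-- ===== LEMMAS AND PROOFS =====

/-- The adjacent-pair predicate a linear scan checks: every adjacent pair is an ok step. -/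
def AllOk (l : List Int) : Prop :=
  ∀ (i : Nat) (h : i + 1 < l.length), okStep (l[i]'(Nat.lt_of_succ_lt h)) (l[i + 1]'h) = true

theorem allOk_nil : AllOk [] := by intro i h; simp at h

theorem allOk_single (a : Int) : AllOk [a] := by intro i h; simp at h

theorem allOk_cons2 (a b : Int) (r : List Int) :
    AllOk (a :: b :: r) ↔ (okStep a b = true ∧ AllOk (b :: r)) := by
  constructor
  · intro h
    refine ⟨h 0 (by simp), ?_⟩
    intro i hi
    have := h (i + 1) (by simp at hi ⊢; omega)
    simpa using this
  · rintro ⟨h1, h2⟩ i hi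
    cases i with
    | zero => simpa using h1
    | succ j =>
      have := h2 j (by simp at hi ⊢; omega)
      simpa using this

theorem firstBad_none_iff (l : List Int) : firstBad l = none ↔ AllOk l := by
  induction l with
  | nil => simp [firstBad]; exact allOk_nil
  | cons a t ih =>
    cases t with
    | nil => simp [firstBad]; exact allOk_single a
    | cons b r =>
      rw [allOk_cons2, ← ih]
      by_cases hab : okStep a b = true
      · simp [firstBad, hab, Option.map_eq_none_iff]
      · simp [firstBad, hab]

theorem firstBad_some (l : List Int) (k : Nat) (h : firstBad l = some k) :
    ∃ (hk : k + 1 < l.length),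
      okStep (l[k]'(Nat.lt_of_succ_lt hk)) (l[k + 1]'hk) = false := by
  induction l generalizing k with
  | nil => simp [firstBad] at h
  | cons a t ih =>
    cases t with
    | nil => simp [firstBad] at h
    | cons b r =>
      by_cases hab : okStep a b = true
      · simp [firstBad, hab] at h
        obtain ⟨k', hk', rfl⟩ := h
        obtain ⟨hlt, hbad⟩ := ih k' hk'
        refine ⟨by simp at hlt ⊢; omega, ?_⟩
        simpa using hbad
      · simp [firstBad, hab] at h
        subst h
        refine ⟨by simp, ?_⟩
        simpa using eq_false_of_ne_true hab

theorem allOk_eraseIdx_false (l : List Int) (k j : Nat) (hk : k + 1 < l.length)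
    (hbad : okStep (l[k]'(Nat.lt_of_succ_lt hk)) (l[k + 1]'hk) = false)
    (hj : j < l.length) (hjk : j ≠ k) (hjk1 : j ≠ k + 1) : ¬ AllOk (l.eraseIdx j) := by
  intro hG
  have hlen : (l.eraseIdx j).length = l.length - 1 := List.length_eraseIdx_of_lt hj
  rcases Nat.lt_or_ge j k with hlt | hge
  · -- j < k: the pair sits at (k-1, k) in the erased list
    have h1 : k - 1 + 1 < (l.eraseIdx j).length := by omega
    have e := hG (k - 1) h1
    rw [List.getElem_eraseIdx_of_ge _ (by omega), List.getElem_eraseIdx_of_ge _ (by omega)] at e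
    simp only [show k - 1 + 1 = k from by omega] at e
    rw [hbad] at e
    exact Bool.false_ne_true e
  · -- j > k + 1: the pair is untouched at (k, k+1)
    have hgt : k + 1 < j := by omega
    have h1 : k + 1 < (l.eraseIdx j).length := by omega
    have e := hG k h1
    rw [List.getElem_eraseIdx_of_lt _ (by omega), List.getElem_eraseIdx_of_lt _ (by omega)] at e
    rw [hbad] at e
    exact Bool.false_ne_true e

theorem eraseIdx_eq_td (l : List Int) (i : Nat) :
    l.take i ++ l.drop (i + 1) = l.eraseIdx i := (List.eraseIdx_eq_take_drop_succ l i).symm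

/-- Core of the speed-up: when the first bad pair is at k, a deletion can only help at k or k+1. -/
theorem existsDel_iff (l : List Int) (k : Nat) (h : firstBad l = some k) :
    (∃ j, j < l.length ∧ AllOk (l.eraseIdx j)) ↔
      (AllOk (l.eraseIdx k) ∨ AllOk (l.eraseIdx (k + 1))) := by
  obtain ⟨hk, hbad⟩ := firstBad_some l k h
  constructor
  · rintro ⟨j, hj, hok⟩
    by_cases h1 : j = k
    · subst h1; exact Or.inl hok
    by_cases h2 : j = k + 1
    · subst h2; exact Or.inr hok
    exact absurd hok (allOk_eraseIdx_false l k j hk hbad hj h1 h2)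
  · rintro (hok | hok)
    · exact ⟨k, by omega, hok⟩
    · exact ⟨k + 1, by omega, hok⟩

theorem dirOk_iff (l : List Int) :
    dirOk l = true ↔ (AllOk l ∨ ∃ j, j < l.length ∧ AllOk (l.eraseIdx j)) := by
  cases hfb : firstBad l with
  | none =>
    have hA : AllOk l := (firstBad_none_iff l).mp hfb
    have hd : dirOk l = true := by unfold dirOk; rw [hfb]
    simp [hd, hA]
  | some k =>
    have hnot : ¬ AllOk l := by
      intro hG
      have h0 := (firstBad_none_iff l).mpr hG
      rw [h0] at hfb; simp at hfb
    have hd : dirOk l =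
        ((firstBad (l.take k ++ l.drop (k + 1))).isNone ||
         (firstBad (l.take (k + 1) ++ l.drop (k + 2))).isNone) := by
      unfold dirOk; rw [hfb]
    rw [hd]
    simp only [Bool.or_eq_true, Option.isNone_iff_eq_none, firstBad_none_iff]
    rw [show l.take k ++ l.drop (k + 1) = l.eraseIdx k from eraseIdx_eq_td l k,
        show l.take (k + 1) ++ l.drop (k + 2) = l.eraseIdx (k + 1) from eraseIdx_eq_td l (k + 1)]
    rw [show (AllOk l ∨ ∃ j, j < l.length ∧ AllOk (l.eraseIdx j)) ↔
        (∃ j, j < l.length ∧ AllOk (l.eraseIdx j)) from by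
      constructor
      · rintro (h | h); · exact absurd h hnot
        · exact h
      · exact Or.inr]
    exact (existsDel_iff l k hfb).symm

-- ===== bridging A's is_valid to AllOk =====

/-- The decreasing predicate of A, via the negated list. -/
theorem allOk_neg_getElem (l : List Int) :
    AllOk (l.map (fun x => -x)) ↔
      ∀ (i : Nat) (h : i + 1 < l.length),
        ((l[i + 1]'h) < (l[i]'(Nat.lt_of_succ_lt h)) ∧
          (l[i]'(Nat.lt_of_succ_lt h)) - (l[i + 1]'h) ≤ 3) := by
  unfold AllOk
  simp only [List.length_map, List.getElem_map, okStep, Bool.and_eq_true, decide_eq_true_eq]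
  constructor
  · intro h i hi; have := h i hi; omega
  · intro h i hi; have := h i hi; omega

theorem allOk_getElem (l : List Int) :
    AllOk l ↔
      ∀ (i : Nat) (h : i + 1 < l.length),
        ((l[i]'(Nat.lt_of_succ_lt h)) < (l[i + 1]'h) ∧
          (l[i + 1]'h) - (l[i]'(Nat.lt_of_succ_lt h)) ≤ 3) := by
  unfold AllOk
  simp only [okStep, Bool.and_eq_true, decide_eq_true_eq]

theorem pyGetD_pair (l : List Int) (i : Int) (h0 : 0 ≤ i) (h1 : i + 1 < (l.length : Int)) :
    PySem.List.pyGetD l i 0 = l[i.toNat]'(by omega) ∧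
    PySem.List.pyGetD l (i + 1) 0 = l[i.toNat + 1]'(by omega) := by
  constructor
  · exact PySem.List.pyGetD_eq_getElem (xs := l) (i := i) (d := 0) h0 (by omega)
  · have := PySem.List.pyGetD_eq_getElem (xs := l) (i := i + 1) (d := 0) (by omega) (by omega)
    rw [this]
    congr 1
    omega

theorem incAll_iff (l : List Int) :
    ((PySem.List.pyRange 0 ((l.length : Int) - 1) 1).all (fun i =>
        decide (PySem.List.pyGetD l i 0 < PySem.List.pyGetD l (i + 1) 0 ∧
                PySem.List.pyGetD l (i + 1) 0 - PySem.List.pyGetD l i 0 ≤ 3)) = true)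
      ↔ AllOk l := by
  rw [List.all_eq_true, allOk_getElem]
  constructor
  · intro h i hi
    have hm : (i : Int) ∈ PySem.List.pyRange 0 ((l.length : Int) - 1) 1 := by
      rw [PySem.List.mem_pyRange_one]; omega
    have := h _ hm
    simp only [decide_eq_true_eq] at this
    obtain ⟨g1, g2⟩ := pyGetD_pair l i (by omega) (by omega)
    rw [g1, g2] at this
    simpa using this
  · intro h i hm
    rw [PySem.List.mem_pyRange_one] at hm
    obtain ⟨h0, h1⟩ := hm
    obtain ⟨g1, g2⟩ := pyGetD_pair l i h0 (by omega)
    simp only [decide_eq_true_eq, g1, g2]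
    have := h i.toNat (by omega)
    omega

theorem decAll_iff (l : List Int) :
    ((PySem.List.pyRange 0 ((l.length : Int) - 1) 1).all (fun i =>
        decide (PySem.List.pyGetD l i 0 > PySem.List.pyGetD l (i + 1) 0 ∧
                PySem.List.pyGetD l i 0 - PySem.List.pyGetD l (i + 1) 0 ≤ 3)) = true)
      ↔ AllOk (l.map (fun x => -x)) := by
  rw [List.all_eq_true, allOk_neg_getElem]
  constructor
  · intro h i hi
    have hm : (i : Int) ∈ PySem.List.pyRange 0 ((l.length : Int) - 1) 1 := by
      rw [PySem.List.mem_pyRange_one]; omega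
    have := h _ hm
    simp only [decide_eq_true_eq] at this
    obtain ⟨g1, g2⟩ := pyGetD_pair l i (by omega) (by omega)
    rw [g1, g2] at this
    simp only [Int.toNat_natCast] at this
    constructor <;> omega
  · intro h i hm
    rw [PySem.List.mem_pyRange_one] at hm
    obtain ⟨h0, h1⟩ := hm
    obtain ⟨g1, g2⟩ := pyGetD_pair l i h0 (by omega)
    simp only [decide_eq_true_eq, g1, g2]
    have := h i.toNat (by omega)
    constructor <;> omega

theorem isValidA_eq_one_iff (l : List Int) :
    isValidA l = 1 ↔ (AllOk l ∨ AllOk (l.map (fun x => -x))) := by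
  rw [← incAll_iff l, ← decAll_iff l]
  unfold isValidA
  split
  next h => exact iff_of_true rfl (by simpa using h)
  next h => exact iff_of_false (by norm_num) (by simpa using h)

theorem isValidA_vals (l : List Int) : isValidA l = 0 ∨ isValidA l = 1 := by
  unfold isValidA
  split <;> simp

theorem slice_del (nums : List Int) (i : Int) (h0 : 0 ≤ i) :
    PySem.List.slice nums none (some i) ++ PySem.List.slice nums (some (i + 1)) none =
      nums.eraseIdx i.toNat := by
  rw [PySem.List.slice_to (hb := h0), PySem.List.slice_from (ha := by omega)]
  rw [← eraseIdx_eq_td]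
  congr 2
  omega

theorem part2Loop_eq_one_iff (nums : List Int) (is : List Int) :
    part2Loop nums is = 1 ↔
      ∃ i ∈ is, isValidA (PySem.List.slice nums none (some i) ++
        PySem.List.slice nums (some (i + 1)) none) = 1 := by
  induction is with
  | nil => simp [part2Loop]
  | cons i rest ih =>
    unfold part2Loop
    rcases isValidA_vals (PySem.List.slice nums none (some i) ++
        PySem.List.slice nums (some (i + 1)) none) with h | h
    · simp [h, ih]
    · simp [h]

theorem part2Loop_eq_one_iff' (nums : List Int) :
    part2Loop nums (PySem.List.pyRange 0 (nums.length : Int) 1) = 1 ↔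
      ∃ j, j < nums.length ∧ (AllOk (nums.eraseIdx j) ∨ AllOk ((nums.eraseIdx j).map (fun x => -x))) := by
  rw [part2Loop_eq_one_iff]
  constructor
  · rintro ⟨i, hm, hv⟩
    rw [PySem.List.mem_pyRange_one] at hm
    rw [slice_del nums i hm.1] at hv
    rw [isValidA_eq_one_iff] at hv
    exact ⟨i.toNat, by omega, hv⟩
  · rintro ⟨j, hj, hv⟩
    refine ⟨(j : Int), ?_, ?_⟩
    · rw [PySem.List.mem_pyRange_one]; omega
    · rw [slice_del nums (j : Int) (by omega), isValidA_eq_one_iff]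
      simpa using hv

theorem eraseIdx_neg (l : List Int) (j : Nat) :
    (l.map (fun x => -x)).eraseIdx j = (l.eraseIdx j).map (fun x => -x) := by
  rw [← eraseIdx_eq_td, ← eraseIdx_eq_td]
  rw [List.map_append, List.map_take, List.map_drop]

theorem part2Loop_zero_or_one (nums : List Int) (is : List Int) :
    part2Loop nums is = 0 ∨ part2Loop nums is = 1 := by
  induction is with
  | nil => simp [part2Loop]
  | cons i rest ih =>
    unfold part2Loop
    split
    · right; rfl
    · exact ih

theorem part_2_eq_one_iff (nums : List Int) :
    part_2 nums = 1 ↔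
      ((AllOk nums ∨ AllOk (nums.map (fun x => -x))) ∨
        ∃ j, j < nums.length ∧
          (AllOk (nums.eraseIdx j) ∨ AllOk ((nums.eraseIdx j).map (fun x => -x)))) := by
  unfold part_2
  rcases isValidA_vals nums with h | h
  · have h' : ¬ (AllOk nums ∨ AllOk (nums.map (fun x => -x))) := by
      rw [← isValidA_eq_one_iff]; omega
    simp only [h]
    norm_num
    rw [part2Loop_eq_one_iff']
    constructor
    · intro hh; exact Or.inr hh
    · rintro (hh | hh); · exact absurd hh h'
      · exact hh
  · have h' : AllOk nums ∨ AllOk (nums.map (fun x => -x)) := by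
      rw [← isValidA_eq_one_iff]; exact h
    simp [h, h']

theorem part_2_alt_eq_one_iff (nums : List Int) :
    part_2_alt nums = 1 ↔
      ((AllOk nums ∨ AllOk (nums.map (fun x => -x))) ∨
        ∃ j, j < nums.length ∧
          (AllOk (nums.eraseIdx j) ∨ AllOk ((nums.eraseIdx j).map (fun x => -x)))) := by
  unfold part_2_alt
  rw [show ((if dirOk nums || dirOk (nums.map fun x => -x) then (1 : Int) else 0) = 1 ↔
      (dirOk nums = true ∨ dirOk (nums.map fun x => -x) = true)) by
    by_cases h : (dirOk nums || dirOk (nums.map fun x => -x)) = true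
    · simp [h]; simpa using h
    · simp [h]; simpa using h]
  rw [dirOk_iff, dirOk_iff]
  constructor
  · rintro (⟨h | ⟨j, hj, hok⟩⟩ | ⟨h | ⟨j, hj, hok⟩⟩)
    · exact Or.inl (Or.inl h)
    · exact Or.inr ⟨j, hj, Or.inl hok⟩
    · exact Or.inl (Or.inr h)
    · rw [eraseIdx_neg] at hok
      refine Or.inr ⟨j, by simpa using hj, Or.inr hok⟩
  · rintro (⟨h | h⟩ | ⟨j, hj, hok | hok⟩)
    · exact Or.inl (Or.inl h)
    · exact Or.inr (Or.inl h)
    · exact Or.inl (Or.inr ⟨j, hj, hok⟩)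
    · refine Or.inr (Or.inr ⟨j, by simpa using hj, ?_⟩)
      rw [eraseIdx_neg]; exact hok

theorem part_2_zero_or_one (nums : List Int) : part_2 nums = 0 ∨ part_2 nums = 1 := by
  unfold part_2
  split
  · right; rfl
  · exact part2Loop_zero_or_one nums _

theorem part_2_alt_zero_or_one (nums : List Int) :
    part_2_alt nums = 0 ∨ part_2_alt nums = 1 := by
  unfold part_2_alt
  split
  · right; rfl
  · left; rfl

-- ===== VERDICT (by name: the statement is the Claim_ definition above) =====
theorem part_2_spec : Claim_equal_part_2 := by
  intro nums _
  unfold Spec_part_2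
  have hiff := (part_2_eq_one_iff nums).trans (part_2_alt_eq_one_iff nums).symm
  rcases part_2_zero_or_one nums with h | h <;>
  rcases part_2_alt_zero_or_one nums with h' | h' <;>
    simp_all
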